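-- pv_equiv track=rewrite | github.com/00Leiner/algo | scheduling.py | room_availability
-- ===== SOURCE A (Python) =====
-- def room_availability(list_of_room, _day, setOfTime):
--   for room, days in list_of_room.items():
--     for day, timeData in days.items():
--       if day == _day:  # getting the day in the room
--         list_of_available = [time for time, slotData in timeData.items() if not slotData] # eliminating the time slot that is already occupied within the day
--         if all(pertime in list_of_available for pertime in setOfTime): # is set of time slot is available in the day return true
--           return True
--
--   return False  # No match found for the specified day and set of times
-- ===== SOURCE B (Python) =====
-- def room_availability(list_of_room, _day, setOfTime):
--     # stage 1: collect every timetable scheduled on the requested day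
--     candidates = [timeData
--                   for days in list_of_room.values()
--                   for day, timeData in days.items()
--                   if day == _day]
--     # stage 2: narrow the candidate set one requested slot at a time;
--     # a slot is usable only if it exists in the timetable and is unoccupied
--     for pertime in setOfTime:
--         candidates = [td for td in candidates
--                       if pertime in td and not td[pertime]]
--     return len(candidates) > 0
-- ===== Notes on version B (the rewrite author's own statement) =====
-- stated objective: alternative
-- what changed: Inverts the loop nesting: B first collects all timetables of the requested day as a candidate set, then loops over the requested slots, filtering candidates down to those where each slot is free, returning whether any candidate survives - instead of A's per-day build-the-free-list-then-membership scan.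
import Mathlib
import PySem

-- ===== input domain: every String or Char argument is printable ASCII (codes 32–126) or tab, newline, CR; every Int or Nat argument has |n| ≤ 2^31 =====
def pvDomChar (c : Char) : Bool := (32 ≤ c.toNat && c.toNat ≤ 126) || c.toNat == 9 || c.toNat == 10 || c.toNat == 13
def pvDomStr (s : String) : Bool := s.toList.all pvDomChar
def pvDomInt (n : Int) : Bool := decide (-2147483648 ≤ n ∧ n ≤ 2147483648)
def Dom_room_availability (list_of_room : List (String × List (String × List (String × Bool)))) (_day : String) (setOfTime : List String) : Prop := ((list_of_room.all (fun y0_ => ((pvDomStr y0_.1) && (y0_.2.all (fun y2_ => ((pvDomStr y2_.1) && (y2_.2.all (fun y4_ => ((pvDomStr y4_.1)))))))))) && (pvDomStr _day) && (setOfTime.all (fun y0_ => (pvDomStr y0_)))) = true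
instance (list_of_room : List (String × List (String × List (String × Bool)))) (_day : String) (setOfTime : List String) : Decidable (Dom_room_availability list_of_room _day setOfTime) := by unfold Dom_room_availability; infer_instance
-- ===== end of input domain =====

-- B inverts the loop nesting: it first collects the candidate timetables of the
-- requested day, then filters that set one requested slot at a time (objective: alternative).

-- ===== PORT A =====
-- inner 'for day, timeData in days.items(): …' loop of A
def pvA_days (_day : String) (setOfTime : List String) : List (String × List (String × Bool)) → Bool
  | [] => false
  | (day, timeData) :: rest =>
    if day == _day then
      let list_of_available := (timeData.filter (fun p => !p.2)).map Prod.fst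
      if setOfTime.all (fun pertime => list_of_available.contains pertime) then true
      else pvA_days _day setOfTime rest
    else pvA_days _day setOfTime rest

def room_availability (list_of_room : List (String × List (String × List (String × Bool)))) (_day : String) (setOfTime : List String) : Bool :=
  match list_of_room with
  | [] => false
  | (_room, days) :: rest =>
    if pvA_days _day setOfTime days then true
    else room_availability rest _day setOfTime

-- ===== PORT B =====
-- 'pertime in td and not td[pertime]' (first-match dict lookup)
def pvB_free (td : List (String × Bool)) (t : String) : Bool :=
  match td.find? (fun p => p.1 == t) with
  | some p => !p.2
  | none => false

def room_availability_alt (list_of_room : List (String × List (String × List (String × Bool)))) (_day : String) (setOfTime : List String) : Bool :=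
  -- stage 1: candidate timetables of the requested day
  let candidates0 := (((list_of_room.map Prod.snd).flatMap id).filter (fun dt => dt.1 == _day)).map Prod.snd
  -- stage 2: narrow the candidates one requested slot at a time
  let candidates := setOfTime.foldl (fun cs pertime => cs.filter (fun td => pvB_free td pertime)) candidates0
  !candidates.isEmpty

-- ===== PRECONDITION & SPEC =====
-- Pre_ excludes association lists in which some day's timeData carries duplicate time keys:
-- those cannot arise from a Python dict (dict keys are unique), and on them A's
-- any-falsy-occurrence membership and B's first-binding lookup are both accidental.
def Pre_room_availability (list_of_room : List (String × List (String × List (String × Bool)))) (_day : String) (setOfTime : List String) : Prop :=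
  ∀ rd ∈ list_of_room, ∀ dt ∈ rd.2, (dt.2.map Prod.fst).Nodup

instance (list_of_room : List (String × List (String × List (String × Bool)))) (_day : String) (setOfTime : List String) : Decidable (Pre_room_availability list_of_room _day setOfTime) := by unfold Pre_room_availability; infer_instance

def pvWitness_room_availability : (List (String × List (String × List (String × Bool)))) × String × List String :=
  ([("R1", [("Mon", [("08:00", false), ("09:00", true)])])], "Mon", ["08:00"])

def Spec_room_availability (list_of_room : List (String × List (String × List (String × Bool)))) (_day : String) (setOfTime : List String) (out : Bool) : Prop := out = room_availability_alt list_of_room _day setOfTime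
instance (list_of_room : List (String × List (String × List (String × Bool)))) (_day : String) (setOfTime : List String) (out : Bool) : Decidable (Spec_room_availability list_of_room _day setOfTime out) := by unfold Spec_room_availability; infer_instance

-- ===== CLAIM (what is proved, stated in full; the proofs are below) =====
def Claim_equal_room_availability : Prop := ∀ (list_of_room : List (String × List (String × List (String × Bool)))) (_day : String) (setOfTime : List String), Dom_room_availability list_of_room _day setOfTime → Pre_room_availability list_of_room _day setOfTime → Spec_room_availability list_of_room _day setOfTime (room_availability list_of_room _day setOfTime)

-- ===== LEMMAS AND PROOFS =====

-- repeated filtering = one filter by the conjunction of all slot tests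
lemma pv_foldl_filter (ts : List String) (cs0 : List (List (String × Bool))) :
    ts.foldl (fun cs t => cs.filter (fun td => pvB_free td t)) cs0
      = cs0.filter (fun td => ts.all (fun t => pvB_free td t)) := by
  induction ts generalizing cs0 with
  | nil => simp
  | cons t rest ih =>
    rw [List.foldl_cons, ih, List.filter_filter]
    congr 1
    funext td
    exact Bool.and_comm _ _

-- On a duplicate-free timeData, membership in A's filtered free-slot list equals B's slot test.
lemma pv_mem_avail_eq_free (td : List (String × Bool)) (t : String)
    (h : (td.map Prod.fst).Nodup) :
    ((td.filter (fun p => !p.2)).map Prod.fst).contains t = pvB_free td t := by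
  induction td with
  | nil => simp [pvB_free]
  | cons p rest ih =>
    obtain ⟨k, v⟩ := p
    simp only [List.map_cons, List.nodup_cons] at h
    rw [List.filter_cons]
    unfold pvB_free
    rw [List.find?]
    by_cases hk : (k == t)
    · cases v with
      | false =>
        simp [hk]
        exact Or.inl (eq_of_beq hk).symm
      | true =>
        have hno : ((rest.filter (fun p => !p.2)).map Prod.fst).contains t = false := by
          rw [List.contains_eq_any_beq]
          simp only [List.any_eq_false]
          intro a ha
          simp only [List.mem_map, List.mem_filter] at ha
          obtain ⟨q, ⟨hq, _⟩, rfl⟩ := ha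
          have hmem : q.1 ∈ rest.map Prod.fst := List.mem_map_of_mem hq
          intro hbeq
          have : t = q.1 := eq_of_beq hbeq
          exact h.1 (by rw [eq_of_beq hk, this]; exact hmem)
        simp only [show ((fun p => !p.2) (k, true) : Bool) = false by simp, Bool.false_eq_true,
          if_false, hk]
        simpa using hno
    · have hbk : (k == t) = false := by simpa using hk
      have htk : (t == k) = false := by
        simp only [beq_eq_false_iff_ne, ne_eq]
        intro he; exact hk (by simp [he])
      cases v with
      | false =>
        simp only [show ((fun p => !p.2) (k, false) : Bool) = true by simp, if_true,
          List.map_cons, List.contains_cons, hbk, htk, Bool.false_or]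
        simpa [pvB_free] using ih h.2
      | true =>
        simp only [show ((fun p => !p.2) (k, true) : Bool) = false by simp, Bool.false_eq_true,
          if_false, hbk]
        simpa [pvB_free] using ih h.2

-- A's inner day loop equals an 'any' over that room's days using B's slot test.
lemma pvA_days_eq_any (_day : String) (setOfTime : List String)
    (days : List (String × List (String × Bool)))
    (h : ∀ dt ∈ days, (dt.2.map Prod.fst).Nodup) :
    pvA_days _day setOfTime days
      = days.any (fun dt => dt.1 == _day && setOfTime.all (fun t => pvB_free dt.2 t)) := by
  induction days with
  | nil => simp [pvA_days]
  | cons dt rest ih =>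
    obtain ⟨day, td⟩ := dt
    have hall : (setOfTime.all fun pertime => ((td.filter (fun p => !p.2)).map Prod.fst).contains pertime)
        = setOfTime.all (fun t => pvB_free td t) := by
      congr 1
      funext t
      exact pv_mem_avail_eq_free td t (h (day, td) (List.mem_cons_self ..))
    have ih' := ih (fun dt hdt => h dt (List.mem_cons_of_mem _ hdt))
    by_cases hd : day == _day
    · simp only [pvA_days, hd, if_true, List.any_cons, Bool.true_and, hall]
      cases hb : setOfTime.all (fun t => pvB_free td t) with
      | true => simp
      | false => simpa using ih'
    · have hd' : (day == _day) = false := by simpa using hd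
      simp [pvA_days, hd', ih', List.any_cons]

-- B unrolled: nonemptiness of the filtered candidates = a flat 'any' over all (day, timeData) pairs.
lemma pv_not_isEmpty {α : Type} (l : List α) : (!l.isEmpty) = l.any (fun _ => true) := by
  induction l <;> simp_all

lemma pv_alt_eq_any (list_of_room : List (String × List (String × List (String × Bool)))) (_day : String) (setOfTime : List String) :
    room_availability_alt list_of_room _day setOfTime
      = ((list_of_room.map Prod.snd).flatMap id).any
          (fun dt => dt.1 == _day && setOfTime.all (fun t => pvB_free dt.2 t)) := by
  unfold room_availability_alt
  simp only []
  rw [pv_foldl_filter, pv_not_isEmpty, List.any_filter, List.any_map, List.any_filter]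
  simp

theorem pv_main (list_of_room : List (String × List (String × List (String × Bool)))) (_day : String) (setOfTime : List String)
    (hpre : Pre_room_availability list_of_room _day setOfTime) :
    room_availability list_of_room _day setOfTime = room_availability_alt list_of_room _day setOfTime := by
  rw [pv_alt_eq_any]
  induction list_of_room with
  | nil => rfl
  | cons rd rest ih =>
    obtain ⟨room, days⟩ := rd
    have hdays := pvA_days_eq_any _day setOfTime days (hpre (room, days) (List.mem_cons_self ..))
    have ih' := ih (fun rd hrd dt hdt => hpre rd (List.mem_cons_of_mem _ hrd) dt hdt)
    rw [show room_availability ((room, days) :: rest) _day setOfTime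
        = if pvA_days _day setOfTime days then true else room_availability rest _day setOfTime from rfl,
      hdays, ih']
    cases h : days.any (fun dt => dt.1 == _day && setOfTime.all (fun t => pvB_free dt.2 t)) <;>
      simp [List.any_append, h]

-- ===== VERDICT (by name: the statement is the Claim_ definition above) =====
theorem room_availability_spec : Claim_equal_room_availability := by
  intro lor _day sot _ hpre
  exact pv_main lor _day sot hpre
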